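-- pv_equiv track=rewrite | github.com/StephenRicher/HiCSim | workflow/scripts/plot_heatmap.py | trim_duplicates
-- ===== SOURCE A (Python) =====
-- def trim_duplicates(values):
--     """ Remove duplicates to avoid duplicate labels in heatmap """
--
--     deduplicated = []
--     for i, value in enumerate(values):
--         # Exclude first value as coordinate probably not exact
--         if i == 0:
--             first = value
--         if value not in deduplicated and value != first:
--             deduplicated.append(value)
--         else:
--             deduplicated.append('')
--     return deduplicated
-- ===== SOURCE B (Python) =====
-- def trim_duplicates(values):
--     """ Remove duplicates to avoid duplicate labels in heatmap """
--     out = [''] * len(values)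
--     # loop over the DISTINCT values (first-appearance order) and scatter each
--     # keepable label into the blank output at its first position
--     for v in dict.fromkeys(values):
--         if v != '' and v != values[0]:
--             out[values.index(v)] = v
--     return out
-- ===== Notes on version B (the rewrite author's own statement) =====
-- stated objective: alternative
-- what changed: A appends per position while scanning the growing output list for membership; B preallocates a blank output of the right length and scatter-writes each distinct value (taken from dict.fromkeys' ordered dedup) at its first index, skipping '' and the head value.
import Mathlib
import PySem

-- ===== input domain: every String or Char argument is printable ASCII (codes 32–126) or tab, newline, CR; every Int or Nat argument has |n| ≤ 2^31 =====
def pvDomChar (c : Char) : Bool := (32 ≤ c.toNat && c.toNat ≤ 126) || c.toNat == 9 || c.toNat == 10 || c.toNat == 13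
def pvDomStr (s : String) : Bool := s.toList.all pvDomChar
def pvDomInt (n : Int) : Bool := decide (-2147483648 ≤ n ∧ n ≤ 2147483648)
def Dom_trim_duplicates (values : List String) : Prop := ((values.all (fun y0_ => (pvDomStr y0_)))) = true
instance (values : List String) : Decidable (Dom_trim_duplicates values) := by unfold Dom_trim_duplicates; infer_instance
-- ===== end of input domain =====

-- B replaces A's positional pass with its membership scan of the growing output by a
-- scatter: preallocate a blank row and write each distinct keepable value at its first
-- index (objective: alternative decomposition, similar cost).

-- ===== PORT A =====
-- the for-loop of A: state is (running index i, `first`, the `deduplicated` accumulator)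
def trimLoopA (i : Int) (first : String) (dedup : List String) (rest : List String) : List String :=
  match rest with
  | [] => dedup
  | v :: vs =>
    let first := if i == 0 then v else first
    if v ∉ dedup ∧ v ≠ first then trimLoopA (i + 1) first (dedup ++ [v]) vs
    else trimLoopA (i + 1) first (dedup ++ [""]) vs

def trim_duplicates (values : List String) : List String :=
  trimLoopA 0 "" [] values

-- ===== PORT B =====
-- 'for v in dict.fromkeys(values): if v != '' and v != values[0]: out[values.index(v)] = v'
-- values.index(v) cannot raise here (v ∈ values), so the none-branch is unreachable
def trim_duplicates_alt (values : List String) : List String :=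
  (PySem.List.dedup values).foldl
    (fun out v =>
      if v ≠ "" ∧ PySem.List.pyGet? values 0 ≠ some v then
        match PySem.List.index? values v with
        | some k => out.set k v
        | none => out
      else out)
    (List.replicate values.length "")

-- ===== PRECONDITION & SPEC =====
def Spec_trim_duplicates (values : List String) (out : List String) : Prop := out = trim_duplicates_alt values
instance (values : List String) (out : List String) : Decidable (Spec_trim_duplicates values out) := by unfold Spec_trim_duplicates; infer_instance

-- ===== CLAIM (what is proved, stated in full; the proofs are below) =====
def Claim_equal_trim_duplicates : Prop := ∀ (values : List String), Dom_trim_duplicates values → Spec_trim_duplicates values (trim_duplicates values)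

-- ===== LEMMAS AND PROOFS =====

-- reference: emit pass keeping track of the set of already-seen labels (incl. the head)
def specOut (head : String) (seen : List String) : List String → List String
  | [] => []
  | v :: vs => (if v ≠ head ∧ v ≠ "" ∧ v ∉ seen then v else "") :: specOut head (seen ++ [v]) vs

theorem trimLoopA_eq_specOut (rest : List String) :
    ∀ (i : Int) (first : String) (dedup seen : List String), 1 ≤ i →
    (∀ u, u ∈ dedup ↔ (u = "" ∨ (u ∈ seen ∧ u ≠ first))) →
    trimLoopA i first dedup rest = dedup ++ specOut first seen rest := by
  induction rest with
  | nil => intro i first dedup seen hi hinv; simp [trimLoopA, specOut]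
  | cons v vs ih =>
    intro i first dedup seen hi hinv
    have hi0 : (i == 0) = false := by simp; omega
    have hcond : (v ∉ dedup ∧ v ≠ first) ↔ (v ≠ first ∧ v ≠ "" ∧ v ∉ seen) := by
      rw [hinv v]; constructor
      · rintro ⟨hn, hf⟩
        push Not at hn
        exact ⟨hf, hn.1, fun hm => hf (hn.2 hm)⟩
      · rintro ⟨hf, he, hs⟩
        refine ⟨?_, hf⟩
        push Not
        exact ⟨he, fun hm => absurd hm hs⟩
    simp only [trimLoopA, hi0, Bool.false_eq_true, if_false, specOut]
    by_cases h : v ≠ first ∧ v ≠ "" ∧ v ∉ seen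
    · rw [if_pos (hcond.mpr h), if_pos h,
        ih (i+1) first (dedup ++ [v]) (seen ++ [v]) (by omega) ?_]
      · simp
      · intro u; simp only [List.mem_append, List.mem_singleton, hinv u]
        constructor
        · rintro (hu | rfl)
          · rcases hu with rfl | ⟨hm, hf⟩
            · exact Or.inl rfl
            · exact Or.inr ⟨Or.inl hm, hf⟩
          · exact Or.inr ⟨Or.inr rfl, h.1⟩
        · rintro (rfl | ⟨hm | rfl, hf⟩)
          · exact Or.inl (Or.inl rfl)
          · exact Or.inl (Or.inr ⟨hm, hf⟩)
          · exact Or.inr rfl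
    · rw [if_neg (fun hc => h (hcond.mp hc)), if_neg h,
        ih (i+1) first (dedup ++ [""]) (seen ++ [v]) (by omega) ?_]
      · simp
      · intro u; simp only [List.mem_append, List.mem_singleton, hinv u]
        constructor
        · rintro (hu | rfl)
          · rcases hu with rfl | ⟨hm, hf⟩
            · exact Or.inl rfl
            · exact Or.inr ⟨Or.inl hm, hf⟩
          · exact Or.inl rfl
        · rintro (rfl | ⟨hm | heq, hf⟩)
          · exact Or.inl (Or.inl rfl)
          · exact Or.inl (Or.inr ⟨hm, hf⟩)
          · rw [heq]
            rw [heq] at hf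
            push Not at h
            rcases eq_or_ne v "" with heq' | hne
            · exact Or.inr heq'
            · rcases eq_or_ne v first with rfl | hnf
              · exact absurd rfl hf
              · exact Or.inl (Or.inr ⟨h hnf hne, hnf⟩)

-- A on a nonempty list
theorem trimA_cons (h : String) (t : List String) :
    trim_duplicates (h :: t) = "" :: specOut h [h] t := by
  have hstep : trim_duplicates (h :: t) = trimLoopA 1 h [""] t := by
    simp [trim_duplicates, trimLoopA]
  rw [hstep, trimLoopA_eq_specOut t 1 h [""] [h] le_rfl]
  · rfl
  · intro u; simp

theorem specOut_length (head : String) (l : List String) :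
    ∀ seen, (specOut head seen l).length = l.length := by
  induction l with
  | nil => intro seen; rfl
  | cons v vs ih => intro seen; simp [specOut, ih]

-- elementwise characterisation of specOut
theorem specOut_getElem? (head : String) (l : List String) :
    ∀ (seen : List String) (j : Nat) (hj : j < l.length),
    (specOut head seen l)[j]? =
      some (if l[j] ≠ head ∧ l[j] ≠ "" ∧ l[j] ∉ seen ∧ l[j] ∉ l.take j then l[j] else "") := by
  induction l with
  | nil => intro _ j hj; simp at hj
  | cons v vs ih =>
    intro seen j hj
    cases j with
    | zero => simp [specOut]
    | succ k =>
      have hk : k < vs.length := by simpa using hj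
      simp only [specOut, List.getElem?_cons_succ, List.getElem_cons_succ, List.take_succ_cons,
        ih (seen ++ [v]) k hk, List.mem_append, List.mem_cons, List.not_mem_nil, or_false]
      congr 1
      apply if_congr ?_ rfl rfl
      tauto

-- what B's scatter writes at position j once the distinct values `done` have been processed
def emitB (values done : List String) (j : Nat) : String :=
  match values[j]? with
  | none => ""
  | some v =>
    if v ∈ done ∧ v ≠ "" ∧ some v ≠ values[0]? ∧ PySem.List.index? values v = some j
    then v else ""

theorem index?_some_spec (values : List String) (v : String) (k : Nat)
    (h : PySem.List.index? values v = some k) : values[k]? = some v := by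
  rcases (PySem.List.index?_eq_some_iff values v k).mp h with ⟨pre, suf, hvals, hlen, _⟩
  subst hvals hlen
  simp

theorem index?_isSome_of_mem (values : List String) (v : String) (h : v ∈ values) :
    ∃ k, PySem.List.index? values v = some k := by
  rw [PySem.List.index?_eq_idxOf?]
  exact Option.isSome_iff_exists.mp (List.isSome_idxOf?.mpr h)

-- the fold invariant of B's scatter loop
theorem foldB_invariant (values : List String) (ds : List String) :
    ∀ (done out : List String),
    (∀ v ∈ ds, v ∈ values) →
    out.length = values.length →
    (∀ j, out[j]? = (values[j]?).map (fun _ => emitB values done j)) →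
    ∀ j, (ds.foldl
        (fun out v =>
          if v ≠ "" ∧ PySem.List.pyGet? values 0 ≠ some v then
            match PySem.List.index? values v with
            | some k => out.set k v
            | none => out
          else out) out)[j]? = (values[j]?).map (fun _ => emitB values (done ++ ds) j) := by
  induction ds with
  | nil => intro done out _ _ hout j; simpa using hout j
  | cons v ds' ih =>
    intro done out hmem hlen hout j
    have hv : v ∈ values := hmem v (List.mem_cons_self)
    have hne : values ≠ [] := by rintro rfl; simp at hv
    have hget0 : PySem.List.pyGet? values 0 = values[0]? := by
      cases values with
      | nil => simp at hne
      | cons a l => simp [PySem.List.pyGet?, PySem.List.pyIdx?]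
    simp only [List.foldl_cons]
    by_cases hc : v ≠ "" ∧ PySem.List.pyGet? values 0 ≠ some v
    · rw [if_pos hc]
      obtain ⟨k, hk⟩ := index?_isSome_of_mem values v hv
      have hvk : values[k]? = some v := index?_some_spec values v k hk
      have hklen : k < values.length := by
        by_contra hb; push Not at hb
        rw [List.getElem?_eq_none hb] at hvk; cases hvk
      rw [hk]
      have hstep : ∀ j, (out.set k v)[j]? =
          (values[j]?).map (fun _ => emitB values (done ++ [v]) j) := by
        intro j
        rcases eq_or_ne j k with rfl | hjk
        · rw [List.getElem?_set_self (by omega), hvk]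
          simp only [Option.map_some]
          congr 1
          simp only [emitB, hvk]
          rw [if_pos]
          refine ⟨by simp, hc.1, ?_, hk⟩
          rw [← hget0]; exact fun e => hc.2 e.symm
        · rw [List.getElem?_set_ne (by omega), hout j]
          cases hvj : values[j]? with
          | none => simp
          | some w =>
            simp only [Option.map_some]
            congr 1
            simp only [emitB, hvj]
            rcases eq_or_ne w v with rfl | hwv
            · -- both sides '' : index? values w = some k ≠ some j
              have hni : PySem.List.index? values w ≠ some j := by
                rw [hk]; intro e; exact hjk (Option.some_inj.mp e).symm
              rw [if_neg (fun h => hni h.2.2.2), if_neg (fun h => hni h.2.2.2)]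
            · congr 2
              simp [List.mem_append, hwv]
      have hlen' : (out.set k v).length = values.length := by
        rw [List.length_set]; exact hlen
      have := ih (done ++ [v]) (out.set k v)
        (fun u hu => hmem u (List.mem_cons_of_mem _ hu)) hlen' hstep j
      simpa using this
    · rw [if_neg hc]
      have hstep : ∀ j, out[j]? =
          (values[j]?).map (fun _ => emitB values (done ++ [v]) j) := by
        intro j
        rw [hout j]
        cases hvj : values[j]? with
        | none => simp
        | some w =>
          simp only [Option.map_some]
          congr 1
          simp only [emitB, hvj]
          rcases eq_or_ne w v with rfl | hwv
          · -- condition false with or without v ∈ done: w = "" or w = values[0]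
            push Not at hc
            by_cases hw : w = ""
            · rw [if_neg (fun h => h.2.1 hw), if_neg (fun h => h.2.1 hw)]
            · have h0 : some w = values[0]? := by rw [← hget0]; exact (hc hw).symm
              rw [if_neg (fun h => h.2.2.1 h0), if_neg (fun h => h.2.2.1 h0)]
          · congr 2
            simp [List.mem_append, hwv]
      have := ih (done ++ [v]) out
        (fun u hu => hmem u (List.mem_cons_of_mem _ hu)) hlen hstep j
      simpa using this

-- B elementwise
theorem trimB_getElem? (values : List String) (j : Nat) :
    (trim_duplicates_alt values)[j]? =
      (values[j]?).map (fun _ => emitB values (PySem.List.dedup values) j) := by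
  have h := foldB_invariant values (PySem.List.dedup values) []
    (List.replicate values.length "")
    (fun v hv => (PySem.List.mem_dedup values v).mp hv)
    (by simp)
    (fun j => by
      cases hvj : values[j]? with
      | none =>
        have hle : values.length ≤ j := List.getElem?_eq_none_iff.mp hvj
        rw [List.getElem?_eq_none (by simpa using hle)]
        simp
      | some w =>
        have hj : j < values.length := by
          by_contra hb; push Not at hb
          rw [List.getElem?_eq_none hb] at hvj; cases hvj
        simp only [Option.map_some]
        rw [List.getElem?_replicate_of_lt hj]
        congr 1
        simp [emitB, hvj]) j
  simpa [trim_duplicates_alt] using h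

-- first occurrence at i ↔ not in the prefix before i
theorem index?_self_iff_not_mem_take (l : List String) (i : Nat) (hi : i < l.length) :
    PySem.List.index? l l[i] = some i ↔ l[i] ∉ l.take i := by
  constructor
  · intro he
    rcases (PySem.List.index?_eq_some_iff l l[i] i).mp he with ⟨pre, suf, hvals, hlen, hnm⟩
    have hpre : l.take i = pre := by
      subst hlen
      rw [hvals, List.take_append_of_le_length le_rfl, List.take_length]
    rwa [hpre]
  · intro hnm
    have hval : l = l.take i ++ l[i] :: l.drop (i + 1) := by
      conv_lhs => rw [← List.take_append_drop i l]
      congr 1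
      rw [List.drop_eq_getElem_cons hi]
    exact (PySem.List.index?_eq_some_iff l l[i] i).mpr
      ⟨l.take i, l.drop (i + 1), hval, by simp [List.length_take]; omega, hnm⟩

-- ===== VERDICT (by name: the statement is the Claim_ definition above) =====
theorem trim_duplicates_spec : Claim_equal_trim_duplicates := by
  intro values _
  unfold Spec_trim_duplicates
  cases values with
  | nil => rfl
  | cons h t =>
    rw [trimA_cons]
    apply List.ext_getElem?
    intro j
    rw [trimB_getElem?]
    cases j with
    | zero =>
      simp only [List.getElem?_cons_zero, Option.map_some]
      congr 1
      simp [emitB]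
    | succ i =>
      simp only [List.getElem?_cons_succ]
      by_cases hi : i < t.length
      · rw [specOut_getElem? h t [h] i hi]
        rw [List.getElem?_eq_getElem hi, Option.map_some]
        congr 1
        have hmem : t[i] ∈ PySem.List.dedup (h :: t) := by
          rw [PySem.List.mem_dedup]
          exact List.mem_cons_of_mem _ (List.getElem_mem hi)
        simp only [emitB, List.getElem?_cons_succ, List.getElem?_eq_getElem hi,
          List.getElem?_cons_zero]
        rcases eq_or_ne t[i] h with heq | hneq
        · rw [if_neg, if_neg]
          · exact fun hc => hc.2.2.1 (by rw [heq])
          · exact fun hc => hc.1 heq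
        · have hidx : PySem.List.index? (h :: t) t[i] = some (i + 1) ↔ t[i] ∉ t.take i := by
            rw [PySem.List.index?_cons_of_ne t (Ne.symm hneq),
              ← index?_self_iff_not_mem_take t i hi]
            cases hx : PySem.List.index? t t[i] with
            | none => simp
            | some m => simp
          apply if_congr ?_ rfl rfl
          constructor
          · rintro ⟨h1, h2, _, h4⟩
            exact ⟨hmem, h2, by simpa using h1, hidx.mpr h4⟩
          · rintro ⟨_, h2, _, h4⟩
            exact ⟨hneq, h2, by simp [hneq], hidx.mp h4⟩
      · push Not at hi
        rw [List.getElem?_eq_none (by simpa [specOut_length] using hi),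
          List.getElem?_eq_none (by simpa using hi)]
        simp
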